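-- pv_equiv track=rewrite | github.com/Havmaagen/Competitive-programming | Solutions/2081. Sum of k-Mirror Numbers.py | make_palindrome
-- ===== SOURCE A (Python) =====
-- def make_palindrome(num, use_last_digit):
--     palindrome = num
--     if not use_last_digit:
--         num //= 10
--     while num:
--         palindrome = 10 * palindrome + num % 10
--         num //= 10
--
--     return palindrome
-- ===== SOURCE B (Python) =====
-- def make_palindrome(num, use_last_digit):
--     s = str(num)
--     mirrored = s + (s[::-1] if use_last_digit else s[:-1][::-1])
--     result = 0
--     for ch in mirrored:
--         result = 10 * result + (ord(ch) - 48)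
--     return result
-- ===== Notes on version B (the rewrite author's own statement) =====
-- stated objective: alternative
-- what changed: B converts the number to its decimal string once, mirrors it by slice reversal (s[::-1] / s[:-1][::-1]) and folds the mirrored character string back into an integer in one forward pass, instead of A's arithmetic digit-peeling while-loop with %10 and //=10 accumulating onto the running palindrome.
-- outside the precondition, e.g. on make_palindrome(-3, True): A does not finish within the time limit, B returns -2673
import Mathlib
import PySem

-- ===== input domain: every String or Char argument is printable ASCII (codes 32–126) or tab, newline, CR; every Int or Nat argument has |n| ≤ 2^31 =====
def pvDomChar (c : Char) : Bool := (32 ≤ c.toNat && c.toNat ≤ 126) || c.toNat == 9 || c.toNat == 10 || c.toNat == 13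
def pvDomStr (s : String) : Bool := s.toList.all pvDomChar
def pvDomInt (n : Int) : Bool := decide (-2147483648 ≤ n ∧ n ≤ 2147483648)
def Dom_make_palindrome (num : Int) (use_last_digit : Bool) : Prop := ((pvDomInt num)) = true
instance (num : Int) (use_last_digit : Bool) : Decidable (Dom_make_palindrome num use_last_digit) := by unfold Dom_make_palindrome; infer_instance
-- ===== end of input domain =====

-- B mirrors the decimal string by slicing and folds its characters back to an int, instead of A's %10 / //=10 peeling loop (objective: alternative).
-- A never returns on negative num (the while-loop does not terminate there), so Pre_ restricts to 0 ≤ num.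

-- ===== PORT A =====
-- A's while-loop; fuel num.natAbs bounds the iteration count (num //= 10 strictly decreases a nonnegative num), making the recursion total.
def pvMirrorLoop : Nat → Int → Int → Int
  | 0, palindrome, _ => palindrome
  | fuel + 1, palindrome, num =>
    if num ≠ 0 then
      pvMirrorLoop fuel (10 * palindrome + PySem.Int.mod num 10) (PySem.Int.floordiv num 10)
    else palindrome

def make_palindrome (num : Int) (use_last_digit : Bool) : Int :=
  let palindrome := num
  let num := if !use_last_digit then PySem.Int.floordiv num 10 else num
  pvMirrorLoop num.natAbs palindrome num

-- ===== PORT B =====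
-- Python: for ch in mirrored: result = 10 * result + (ord(ch) - 48).  ord(ch) is exactly Char.toNat on ASCII.
def pvCharFold (cs : List Char) (result : Int) : Int :=
  cs.foldl (fun result ch => 10 * result + ((ch.toNat : Int) - 48)) result

def make_palindrome_alt (num : Int) (use_last_digit : Bool) : Int :=
  let s := PySem.Int.toChars num                 -- s = str(num)
  let mirrored := s ++ (if use_last_digit then s.reverse
                        else (PySem.List.slice s none (some (-1))).reverse)  -- s[::-1] / s[:-1][::-1]
  pvCharFold mirrored 0

-- ===== PRECONDITION & SPEC =====
-- A's while-loop never terminates for negative num (num //= 10 stalls at -1), so Pre_ admits exactly the inputs on which A returns.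
def Pre_make_palindrome (num : Int) (use_last_digit : Bool) : Prop := 0 ≤ num
instance (num : Int) (use_last_digit : Bool) : Decidable (Pre_make_palindrome num use_last_digit) := by unfold Pre_make_palindrome; infer_instance
def pvWitness_make_palindrome : Int × Bool := (123, true)

def Spec_make_palindrome (num : Int) (use_last_digit : Bool) (out : Int) : Prop := out = make_palindrome_alt num use_last_digit
instance (num : Int) (use_last_digit : Bool) (out : Int) : Decidable (Spec_make_palindrome num use_last_digit out) := by unfold Spec_make_palindrome; infer_instance

-- ===== CLAIM (what is proved, stated in full; the proofs are below) =====
def Claim_equal_make_palindrome : Prop := ∀ (num : Int) (use_last_digit : Bool), Dom_make_palindrome num use_last_digit → Pre_make_palindrome num use_last_digit → Spec_make_palindrome num use_last_digit (make_palindrome num use_last_digit)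

-- ===== LEMMAS AND PROOFS =====

-- the common abstract fold over little-endian Nat digit lists
def pvF (a : Int) (ds : List Nat) : Int := ds.foldl (fun a d => 10 * a + (d : Int)) a

theorem pvF_append (a : Int) (xs ys : List Nat) : pvF a (xs ++ ys) = pvF (pvF a xs) ys := by
  simp [pvF]

-- A's loop computes pvF over Nat.digits
theorem pvMirrorLoop_eq (fuel : Nat) : ∀ (n : Nat), n ≤ fuel → ∀ (p : Int),
    pvMirrorLoop fuel p (n : Int) = pvF p (Nat.digits 10 n) := by
  induction fuel with
  | zero => intro n hn p; interval_cases n; simp [pvMirrorLoop, pvF]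
  | succ fuel ih =>
    intro n hn p
    by_cases h0 : n = 0
    · subst h0; simp [pvMirrorLoop, pvF]
    · have h1 : 0 < n := Nat.pos_of_ne_zero h0
      have : ((n : Int) ≠ 0) := by exact_mod_cast h0
      have hm : PySem.Int.mod (n : Int) 10 = ((n % 10 : Nat) : Int) := by
        exact_mod_cast PySem.Int.mod_natCast n 10
      have hf : PySem.Int.floordiv (n : Int) 10 = ((n / 10 : Nat) : Int) := by
        exact_mod_cast PySem.Int.floordiv_natCast n 10
      rw [pvMirrorLoop, if_pos this, hm, hf,
        ih (n / 10) (by omega) _, Nat.digits_def' (by norm_num : 1 < 10) h1]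
      simp [pvF]

-- reading the reversed digit list left-to-right reconstructs the number
theorem pvF_reverse_digits (n : Nat) : pvF 0 ((Nat.digits 10 n).reverse) = (n : Int) := by
  induction n using Nat.strong_induction_on with
  | _ n ih =>
    by_cases h0 : n = 0
    · subst h0; simp [pvF]
    · rw [Nat.digits_def' (by norm_num : 1 < 10) (Nat.pos_of_ne_zero h0), List.reverse_cons,
        pvF_append, ih (n / 10) (Nat.div_lt_self (Nat.pos_of_ne_zero h0) (by norm_num))]
      simp [pvF]
      have := Nat.div_add_mod n 10
      omega

-- Nat.toDigits is the reversed Nat.digits rendered with digitChar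
theorem pvToDigits_eq (n : Nat) (hn : 0 < n) :
    Nat.toDigits 10 n = ((Nat.digits 10 n).reverse.map Nat.digitChar) := by
  induction n using Nat.strong_induction_on with
  | _ n ih =>
    rw [Nat.toDigits_eq_if (by norm_num)]
    by_cases h : n < 10
    · rw [if_pos h, Nat.digits_def' (by norm_num : 1 < 10) hn, Nat.div_eq_of_lt h]
      simp [Nat.mod_eq_of_lt h]
    · rw [if_neg h, Nat.digits_def' (by norm_num : 1 < 10) hn, List.reverse_cons, List.map_append,
        ih (n / 10) (Nat.div_lt_self hn (by norm_num)) (by omega)]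
      simp

-- digitChar inverts on digits
theorem pvDigitChar_toNat (d : Nat) (hd : d < 10) : ((Nat.digitChar d).toNat : Int) - 48 = (d : Int) := by
  interval_cases d <;> decide

-- the char fold equals pvF on rendered digit lists
theorem pvCharFold_map (ds : List Nat) (h : ∀ d ∈ ds, d < 10) (a : Int) :
    pvCharFold (ds.map Nat.digitChar) a = pvF a ds := by
  induction ds generalizing a with
  | nil => simp [pvCharFold, pvF]
  | cons d ds ih =>
    simp only [List.map_cons, pvCharFold, List.foldl_cons] at *
    rw [pvDigitChar_toNat d (h d (by simp)), ih (fun x hx => h x (by simp [hx]))]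
    simp [pvF]

theorem pvCharFold_append (xs ys : List Char) (a : Int) :
    pvCharFold (xs ++ ys) a = pvCharFold ys (pvCharFold xs a) := by
  simp [pvCharFold]

-- ===== VERDICT (by name: the statement is the Claim_ definition above) =====
theorem make_palindrome_spec : Claim_equal_make_palindrome := by
  intro num use_last_digit _ hpre
  unfold Spec_make_palindrome make_palindrome make_palindrome_alt
  obtain ⟨n, rfl⟩ := Int.eq_ofNat_of_zero_le hpre
  have hdig : ∀ d ∈ Nat.digits 10 n, d < 10 := fun d hd => Nat.digits_lt_base (by norm_num) hd
  have hdigR : ∀ d ∈ (Nat.digits 10 n).reverse, d < 10 := by simpa using hdig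
  have htc : PySem.Int.toChars (n : Int) = Nat.toDigits 10 n := by
    simp [PySem.Int.toChars]
  by_cases h0 : n = 0
  · subst h0
    cases use_last_digit <;> decide
  · have h1 : 0 < n := Nat.pos_of_ne_zero h0
    have hfloor : PySem.Int.floordiv (n : Int) 10 = ((n / 10 : Nat) : Int) :=
      PySem.Int.floordiv_natCast n 10
    have hS : PySem.Int.toChars (n : Int) = (Nat.digits 10 n).reverse.map Nat.digitChar := by
      rw [htc, pvToDigits_eq n h1]
    have hval : pvCharFold ((Nat.digits 10 n).reverse.map Nat.digitChar) 0 = (n : Int) := by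
      rw [pvCharFold_map _ hdigR 0, pvF_reverse_digits]
    cases use_last_digit with
    | true =>
      simp only [Bool.not_true, Bool.false_eq_true, if_false, if_true, Int.natAbs_natCast, hS]
      rw [pvMirrorLoop_eq n n (le_refl n) ((n : Int)), pvCharFold_append, hval,
        ← List.map_reverse, List.reverse_reverse, pvCharFold_map _ hdig]
    | false =>
      simp only [Bool.not_false, Bool.false_eq_true, if_true, if_false, hfloor,
        Int.natAbs_natCast, hS]
      rw [pvMirrorLoop_eq (n / 10) (n / 10) (le_refl _) _, PySem.List.slice_to_neg_one,
        ← List.map_dropLast, List.dropLast_reverse, ← List.map_reverse, List.reverse_reverse,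
        pvCharFold_append, hval, pvCharFold_map]
      · congr 1
        rw [Nat.digits_def' (by norm_num : 1 < 10) h1]
        simp
      · intro d hd
        exact hdig d (List.mem_of_mem_tail hd)
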